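-- pv_equiv track=rewrite | github.com/mendy5692/Python | Homework/an_ordered_list.py | creat_list_order
-- ===== SOURCE A (Python) =====
-- def creat_list_order(lst):
--     even =[]
--     odd = []
--     for i in lst:
--         if i % 2 == 0:
--             even.append(i)
--         else:
--             odd.append(i)
--     return even + odd
-- ===== SOURCE B (Python) =====
-- def creat_list_order(lst):
--     return sorted(lst, key=lambda i: i % 2 != 0)
-- ===== Notes on version B (the rewrite author's own statement) =====
-- stated objective: idiomatic
-- what changed: Replaces the two-accumulator partition loop with a single stable sort keyed on the boolean i % 2 != 0; stability preserves the original order within evens and within odds.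
import Mathlib
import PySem

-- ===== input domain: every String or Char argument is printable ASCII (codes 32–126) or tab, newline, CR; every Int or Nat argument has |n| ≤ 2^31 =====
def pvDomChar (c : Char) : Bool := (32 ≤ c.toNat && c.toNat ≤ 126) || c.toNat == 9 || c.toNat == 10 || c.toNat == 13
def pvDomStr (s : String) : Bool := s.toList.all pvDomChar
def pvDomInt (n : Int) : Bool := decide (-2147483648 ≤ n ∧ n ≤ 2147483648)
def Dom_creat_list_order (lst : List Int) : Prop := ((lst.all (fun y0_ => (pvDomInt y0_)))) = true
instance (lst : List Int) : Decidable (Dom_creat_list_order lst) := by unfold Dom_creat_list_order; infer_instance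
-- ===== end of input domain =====

-- B replaces the two-accumulator partition loop with one stable sort on the boolean key i % 2 != 0 (idiomatic; not faster).

-- ===== PORT A =====
def creat_list_order (lst : List Int) : List Int :=
  let p := lst.foldl
    (fun (s : List Int × List Int) i =>
      if PySem.Int.mod i 2 = 0 then (s.1 ++ [i], s.2) else (s.1, s.2 ++ [i]))
    ([], [])
  p.1 ++ p.2

-- ===== PORT B =====
def creat_list_order_alt (lst : List Int) : List Int :=
  PySem.List.sorted lst (fun i => decide (PySem.Int.mod i 2 ≠ 0))

-- ===== PRECONDITION & SPEC =====
def Spec_creat_list_order (lst : List Int) (out : List Int) : Prop := out = creat_list_order_alt lst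
instance (lst : List Int) (out : List Int) : Decidable (Spec_creat_list_order lst out) := by unfold Spec_creat_list_order; infer_instance

-- ===== CLAIM (what is proved, stated in full; the proofs are below) =====
def Claim_equal_creat_list_order : Prop := ∀ (lst : List Int), Dom_creat_list_order lst → Spec_creat_list_order lst (creat_list_order lst)

-- ===== LEMMAS AND PROOFS =====

-- the parity key B sorts by
def pvKey (i : Int) : Bool := decide (PySem.Int.mod i 2 ≠ 0)

-- inserting an even element into evens ++ odds lands it at the end of the evens
lemma pv_ins_even (x : Int) (hx : pvKey x = false) (E O : List Int)
    (hE : ∀ e ∈ E, pvKey e = false) (hO : ∀ o ∈ O, pvKey o = true) :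
    PySem.List.insertBy (fun a b => decide (pvKey a < pvKey b)) x (E ++ O)
      = (E ++ [x]) ++ O := by
  induction E with
  | nil =>
    cases O with
    | nil => simp [PySem.List.insertBy]
    | cons o os =>
      have ho : pvKey o = true := hO o (by simp)
      simp [PySem.List.insertBy, hx, ho]
  | cons e E ih =>
    have he : pvKey e = false := hE e (by simp)
    simp only [List.cons_append, PySem.List.insertBy, hx, he]
    simp [ih (fun a ha => hE a (by simp [ha]))]

-- inserting an odd element always lands at the very end
lemma pv_ins_odd (x : Int) (hx : pvKey x = true) (L : List Int) :
    PySem.List.insertBy (fun a b => decide (pvKey a < pvKey b)) x L = L ++ [x] := by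
  apply PySem.List.insertBy_of_forall_not_before
  intro y _
  simp [hx]

-- joint loop invariant: A's two accumulators concatenated equal B's insertion-sort fold
lemma pv_main (lst : List Int) : ∀ (E O : List Int),
    (∀ e ∈ E, pvKey e = false) → (∀ o ∈ O, pvKey o = true) →
    (let p := lst.foldl
        (fun (s : List Int × List Int) i =>
          if PySem.Int.mod i 2 = 0 then (s.1 ++ [i], s.2) else (s.1, s.2 ++ [i]))
        (E, O)
     p.1 ++ p.2)
      = lst.foldl
          (fun acc x => PySem.List.insertBy (fun a b => decide (pvKey a < pvKey b)) x acc)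
          (E ++ O) := by
  induction lst with
  | nil => intro E O _ _; simp
  | cons i t ih =>
    intro E O hE hO
    by_cases h : PySem.Int.mod i 2 = 0
    · have hk : pvKey i = false := by simp only [pvKey, h]; decide
      simp only [List.foldl_cons, if_pos h]
      rw [pv_ins_even i hk E O hE hO]
      exact ih (E ++ [i]) O
        (fun a ha => by
          rcases List.mem_append.mp ha with h1 | h1
          · exact hE a h1
          · simp at h1; simp [h1, hk]) hO
    · have hk : pvKey i = true := by unfold pvKey; exact decide_eq_true h
      simp only [List.foldl_cons, if_neg h]
      rw [pv_ins_odd i hk (E ++ O), List.append_assoc]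
      exact ih E (O ++ [i]) hE
        (fun a ha => by
          rcases List.mem_append.mp ha with h1 | h1
          · exact hO a h1
          · simp at h1; simp [h1, hk])

-- ===== VERDICT (by name: the statement is the Claim_ definition above) =====
theorem creat_list_order_spec : Claim_equal_creat_list_order := by
  intro lst _
  unfold Spec_creat_list_order creat_list_order creat_list_order_alt
  rw [PySem.List.sorted_eq_foldl_insertBy]
  exact pv_main lst [] [] (by simp) (by simp)
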